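-- pv_equiv track=rewrite | github.com/valik94/PythonProblems | labs109.py | double_trouble
-- ===== SOURCE A (Python) =====
-- def double_trouble(items, n):
--     step, pos = 1, 0
--     while n > 0:
--         n -= step
--         if n < 1:
--             return items[pos]
--         pos += 1
--         if pos >= len(items):
--             step, pos = step * 2, 0
-- ===== SOURCE B (Python) =====
-- def double_trouble(items, n):
--     # Closed form: in pass k (0-based) each item occupies 2**k slots, so pass k
--     # starts after L*(2**k - 1) slots.  Requires n >= 1 and non-empty items.
--     L = len(items)
--     q = (n - 1) // L
--     k = (q + 1).bit_length() - 1
--     step = 1 << k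
--     return items[(n - 1 - L * (step - 1)) // step]
-- ===== Notes on version B (the rewrite author's own statement) =====
-- stated objective: faster
-- what changed: Replaced the step-doubling simulation loop with a closed form: the pass index comes from a geometric-sum bound via bit_length and the position from one integer division.
-- outside the precondition, e.g. on double_trouble([1, 2], 0): A returns None, B raises ValueError; on double_trouble([], 3): A raises IndexError, B raises ZeroDivisionError
import Mathlib
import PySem

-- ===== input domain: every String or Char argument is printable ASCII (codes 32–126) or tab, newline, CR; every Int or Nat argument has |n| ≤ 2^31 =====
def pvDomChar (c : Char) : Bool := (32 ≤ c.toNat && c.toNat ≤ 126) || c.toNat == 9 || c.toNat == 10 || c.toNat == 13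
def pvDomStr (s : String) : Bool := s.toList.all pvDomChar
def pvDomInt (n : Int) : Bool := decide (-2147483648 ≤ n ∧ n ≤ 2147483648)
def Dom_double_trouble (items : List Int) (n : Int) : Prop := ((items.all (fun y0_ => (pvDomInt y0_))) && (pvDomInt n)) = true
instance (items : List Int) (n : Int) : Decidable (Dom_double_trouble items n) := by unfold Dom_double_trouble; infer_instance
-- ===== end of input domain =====

-- B replaces A's step-doubling simulation loop with a closed form (pass index via
-- bit_length of a geometric-sum quotient, position via one integer division); objective: faster.

-- ===== PORT A =====
-- A's while-loop; fuel = n.toNat bounds the iteration count (each iteration lowers n by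
-- step ≥ 1, so the fuel is never exhausted on a run that Python completes); 0 stands in
-- for Python's None / IndexError results, all excluded by Pre_double_trouble.
def pvLoopA (items : List Int) (fuel : Nat) (n step pos : Int) : Int :=
  match fuel with
  | 0 => 0
  | f + 1 =>
    if n ≤ 0 then 0
    else
      let n' := n - step
      if n' < 1 then (PySem.List.pyGet? items pos).getD 0
      else if pos + 1 ≥ (items.length : Int) then pvLoopA items f n' (step * 2) 0
      else pvLoopA items f n' step (pos + 1)

def double_trouble (items : List Int) (n : Int) : Int := pvLoopA items n.toNat n 1 0

-- ===== PORT B =====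
-- Python: q = (n-1)//L; k = (q+1).bit_length() - 1; step = 1 << k; items[(n-1-L*(step-1))//step]
-- (k : Nat with truncated '- 1' and pyGet?.getD 0: exact under Pre_, where q+1 ≥ 1 and the index is in range)
def double_trouble_alt (items : List Int) (n : Int) : Int :=
  let L : Int := items.length
  let q : Int := PySem.Int.floordiv (n - 1) L
  let k : Nat := PySem.Int.bitLength (q + 1) - 1
  let step : Int := (1 : Int) <<< k
  (PySem.List.pyGet? items (PySem.Int.floordiv (n - 1 - L * (step - 1)) step)).getD 0

-- ===== PRECONDITION & SPEC =====
-- Pre_ excludes the empty list (A raises IndexError) and n ≤ 0 (A returns None, not an int).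
def Pre_double_trouble (items : List Int) (n : Int) : Prop := items ≠ [] ∧ 1 ≤ n
instance (items : List Int) (n : Int) : Decidable (Pre_double_trouble items n) := by
  unfold Pre_double_trouble; infer_instance
def pvWitness_double_trouble : List Int × Int := ([4, 5, 6], 11)

def Spec_double_trouble (items : List Int) (n : Int) (out : Int) : Prop := out = double_trouble_alt items n
instance (items : List Int) (n : Int) (out : Int) : Decidable (Spec_double_trouble items n out) := by unfold Spec_double_trouble; infer_instance

-- ===== CLAIM (what is proved, stated in full; the proofs are below) =====
def Claim_equal_double_trouble : Prop := ∀ (items : List Int) (n : Int), Dom_double_trouble items n → Pre_double_trouble items n → Spec_double_trouble items n (double_trouble items n)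

-- ===== LEMMAS AND PROOFS =====

lemma pv_bitLength_eq (m : Int) (k : Nat) (h1 : (2:Int)^k ≤ m) (h2 : m < 2^(k+1)) :
    PySem.Int.bitLength m = k + 1 := by
  have hmpos : 0 < m := lt_of_lt_of_le (by positivity) h1
  have hm0 : m ≠ 0 := ne_of_gt hmpos
  have hml : m.natAbs < 2 ^ PySem.Int.bitLength m := PySem.Int.lt_two_pow_bitLength m
  have hmg : 2 ^ (PySem.Int.bitLength m - 1) ≤ m.natAbs := PySem.Int.two_pow_bitLength_le m hm0
  have habs : (m.natAbs : Int) = m := Int.natAbs_of_nonneg (le_of_lt hmpos)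
  have h1' : 2 ^ k ≤ m.natAbs := by
    have := h1; rw [← habs] at this; exact_mod_cast this
  have h2' : m.natAbs < 2 ^ (k+1) := by
    have := h2; rw [← habs] at this; exact_mod_cast this
  have hb1 : PySem.Int.bitLength m - 1 < k + 1 := by
    by_contra hc
    push Not at hc
    exact absurd (lt_of_le_of_lt (le_trans (Nat.pow_le_pow_right (by norm_num) hc) hmg) h2')
      (lt_irrefl _)
  have hb2 : k < PySem.Int.bitLength m := by
    by_contra hc
    push Not at hc
    exact absurd (lt_of_le_of_lt (le_trans (Nat.pow_le_pow_right (by norm_num) hc) h1') hml)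
      (lt_irrefl _)
  omega

-- the closed form evaluated at the global index of state (n, 2^k, pos)
lemma pv_alt_at (items : List Int) (k : Nat) (pos n : Int)
    (hL : 1 ≤ (items.length : Int))
    (h0 : 0 ≤ pos) (hp : pos < (items.length : Int))
    (h1 : 1 ≤ n) (h2 : n ≤ 2^k) :
    double_trouble_alt items (n + pos * 2^k + (items.length : Int) * (2^k - 1))
      = (PySem.List.pyGet? items pos).getD 0 := by
  set L : Int := (items.length : Int) with hLdef
  have hLpos : 0 < L := by omega
  have hstep : (0:Int) < 2^k := by positivity
  unfold double_trouble_alt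
  dsimp only
  set N : Int := n + pos * 2^k + L * (2^k - 1) with hN
  set q : Int := PySem.Int.floordiv (N - 1) L with hq
  -- bounds on q
  have hqlo : 2^k - 1 ≤ q := by
    rw [hq, PySem.Int.le_floordiv_iff_mul_le hLpos]
    nlinarith
  have hqhi : q < 2^(k+1) - 1 := by
    rw [hq, PySem.Int.floordiv_lt_iff_lt_mul hLpos]
    have : (2:Int)^(k+1) = 2 * 2^k := by ring
    nlinarith
  have hbl : PySem.Int.bitLength (q + 1) = k + 1 :=
    pv_bitLength_eq _ k (by omega) (by omega)
  have hk : PySem.Int.bitLength (q + 1) - 1 = k := by omega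
  rw [hk]
  have hshift : (1 : Int) <<< k = 2^k := by
    rw [Int.shiftLeft_eq]; ring
  rw [hshift]
  have hidx : PySem.Int.floordiv (N - 1 - L * (2^k - 1)) (2^k) = pos := by
    rw [PySem.Int.floordiv_eq_iff_of_pos hstep]
    constructor <;> nlinarith
  rw [hidx]

lemma pv_loopA_eq (items : List Int) (hL : 1 ≤ (items.length : Int)) :
    ∀ (fuel : Nat) (n : Int) (k : Nat) (pos : Int),
    1 ≤ n → n ≤ (fuel : Int) → 0 ≤ pos → pos < (items.length : Int) →
    pvLoopA items fuel n (2^k) pos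
      = double_trouble_alt items (n + pos * 2^k + (items.length : Int) * (2^k - 1)) := by
  intro fuel
  induction fuel with
  | zero => intro n k pos h1 hf _ _; simp at hf; omega
  | succ f ih =>
    intro n k pos h1 hf h0 hp
    have hstep : (0:Int) < 2^k := by positivity
    rw [pvLoopA]
    rw [if_neg (by omega)]
    by_cases hret : n - 2^k < 1
    · rw [if_pos hret]
      exact (pv_alt_at items k pos n hL h0 hp h1 (by omega)).symm
    · rw [if_neg hret]
      have h1' : 1 ≤ n - 2^k := by omega
      have hf' : n - 2^k ≤ (f : Int) := by push_cast at hf ⊢; omega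
      by_cases hwrap : pos + 1 ≥ (items.length : Int)
      · rw [if_pos hwrap]
        have hposL : pos = (items.length : Int) - 1 := by omega
        have h2k : (2:Int)^k * 2 = 2^(k+1) := by ring
        rw [h2k, ih (n - 2^k) (k+1) 0 h1' hf' le_rfl (by omega)]
        congr 1
        have : (2:Int)^(k+1) = 2 * 2^k := by ring
        rw [hposL]; nlinarith [this]
      · rw [if_neg hwrap]
        rw [ih (n - 2^k) k (pos + 1) h1' hf' (by omega) (by omega)]
        congr 1
        ring

-- ===== VERDICT (by name: the statement is the Claim_ definition above) =====
theorem double_trouble_spec : Claim_equal_double_trouble := by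
  intro items n _ hpre
  obtain ⟨hne, hn⟩ := hpre
  have hL : 1 ≤ (items.length : Int) := by
    have : items.length ≠ 0 := by simpa using hne
    omega
  unfold Spec_double_trouble double_trouble
  have hfuel : n ≤ (n.toNat : Int) := by omega
  have := pv_loopA_eq items hL n.toNat n 0 0 hn hfuel le_rfl (by omega)
  simpa using this
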